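-- pv_equiv track=rewrite | github.com/cyberewok/cgt-sandpit | Examples/mark1Examples/centraliser_sims_search.py | _partition_heuristic
-- ===== SOURCE A (Python) =====
-- def _partition_heuristic(base, image, part):
--     for b,i in zip(base,image):
--         for cell in part:
--             if b in cell:
--                 if i in cell:
--                     break
--                 else:
--                     return True
--     return False
-- ===== SOURCE B (Python) =====
-- def _partition_heuristic(base, image, part):
--     first = {}
--     for cell in part:
--         for x in cell:
--             if x not in first:
--                 first[x] = cell
--     for b, i in zip(base, image):
--         cell = first.get(b)
--         if cell is not None and i not in cell:
--             return True
--     return False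
-- ===== Notes on version B (the rewrite author's own statement) =====
-- stated objective: faster
-- what changed: B precomputes one dict mapping each element to the first partition cell containing it, replacing A's per-pair scan over all cells with a single O(1) dict lookup followed by one membership test in that cell.
import Mathlib
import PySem

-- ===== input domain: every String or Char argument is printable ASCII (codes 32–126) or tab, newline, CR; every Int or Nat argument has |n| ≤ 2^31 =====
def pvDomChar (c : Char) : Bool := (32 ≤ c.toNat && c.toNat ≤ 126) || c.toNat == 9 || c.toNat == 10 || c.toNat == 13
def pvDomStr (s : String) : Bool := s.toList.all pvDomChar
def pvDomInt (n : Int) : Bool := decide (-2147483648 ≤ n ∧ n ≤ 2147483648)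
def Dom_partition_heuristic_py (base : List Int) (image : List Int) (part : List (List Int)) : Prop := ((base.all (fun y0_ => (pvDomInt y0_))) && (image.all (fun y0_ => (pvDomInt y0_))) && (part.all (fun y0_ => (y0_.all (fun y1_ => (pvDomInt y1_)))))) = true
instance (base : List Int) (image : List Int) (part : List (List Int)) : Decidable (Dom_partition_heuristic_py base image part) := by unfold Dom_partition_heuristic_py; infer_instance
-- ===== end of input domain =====

-- B replaces A's per-pair scan over all cells by one precomputed dict element → first cell containing it (objective: faster).

-- ===== PORT A =====
-- inner 'for cell in part' loop of A: first cell containing b; break if i there, else return True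
def pvAInner (b i : Int) (cells : List (List Int)) : Bool :=
  match cells with
  | [] => false
  | cell :: rest =>
    if cell.contains b then (if cell.contains i then false else true)
    else pvAInner b i rest

-- outer 'for b,i in zip(base,image)' loop of A
def pvALoop (part : List (List Int)) (pairs : List (Int × Int)) : Bool :=
  match pairs with
  | [] => false
  | (b, i) :: rest => if pvAInner b i part then true else pvALoop part rest

def partition_heuristic_py (base : List Int) (image : List Int) (part : List (List Int)) : Bool :=
  pvALoop part (base.zip image)

-- ===== PORT B =====
-- B's first pass: dict mapping each element to the first cell containing it
def pvFirstDict (part : List (List Int)) : PySem.Dict Int (List Int) :=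
  part.foldl
    (fun d cell => cell.foldl (fun d x => if d.contains x then d else d.insert x cell) d)
    PySem.Dict.empty

-- B's second pass over the zipped pairs, with the dict lookup
def pvBLoop (first : PySem.Dict Int (List Int)) (pairs : List (Int × Int)) : Bool :=
  match pairs with
  | [] => false
  | (b, i) :: rest =>
    match first.get? b with
    | some cell => if cell.contains i then pvBLoop first rest else true
    | none => pvBLoop first rest

def partition_heuristic_py_alt (base : List Int) (image : List Int) (part : List (List Int)) : Bool :=
  pvBLoop (pvFirstDict part) (base.zip image)

-- ===== PRECONDITION & SPEC =====
def Spec_partition_heuristic_py (base : List Int) (image : List Int) (part : List (List Int)) (out : Bool) : Prop := out = partition_heuristic_py_alt base image part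
instance (base : List Int) (image : List Int) (part : List (List Int)) (out : Bool) : Decidable (Spec_partition_heuristic_py base image part out) := by unfold Spec_partition_heuristic_py; infer_instance

-- ===== CLAIM (what is proved, stated in full; the proofs are below) =====
def Claim_equal_partition_heuristic_py : Prop := ∀ (base : List Int) (image : List Int) (part : List (List Int)), Dom_partition_heuristic_py base image part → Spec_partition_heuristic_py base image part (partition_heuristic_py base image part)

-- ===== LEMMAS AND PROOFS =====

-- the inner element loop of pvFirstDict only fills missing keys with the fixed cell v
theorem pvInner_get? (xs : List Int) (d : PySem.Dict Int (List Int)) (v : List Int) (x : Int) :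
    ((xs.foldl (fun d y => if d.contains y then d else d.insert y v) d).get? x)
      = (d.get? x).or (if xs.contains x then some v else none) := by
  induction xs generalizing d with
  | nil => simp
  | cons y ys ih =>
    simp only [List.foldl_cons, List.contains_cons]
    rw [ih]
    by_cases hc : d.contains y = true
    · simp only [hc, if_pos]
      by_cases hxy : x = y
      · subst hxy
        rw [PySem.Dict.contains_eq_isSome_get?] at hc
        obtain ⟨w, hw⟩ := Option.isSome_iff_exists.mp hc
        simp [hw]
      · simp [hxy, beq_iff_eq]
    · simp only [hc, if_neg, Bool.not_eq_true]
      rw [PySem.Dict.get?_insert]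
      by_cases hxy : x = y
      · subst hxy
        rw [PySem.Dict.contains_eq_isSome_get?] at hc
        have hn : d.get? x = none := Option.not_isSome_iff_eq_none.mp hc
        simp [hn]
      · simp [hxy, beq_iff_eq]

-- the dict built by B holds, for each x, the first cell of part containing x
theorem pvFirstDict_get?_aux (part : List (List Int)) (d : PySem.Dict Int (List Int)) (x : Int) :
    ((part.foldl
        (fun d cell => cell.foldl (fun d x => if d.contains x then d else d.insert x cell) d)
        d).get? x)
      = (d.get? x).or (part.find? (fun c => c.contains x)) := by
  induction part generalizing d with
  | nil => simp
  | cons cell rest ih =>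
    simp only [List.foldl_cons]
    rw [ih, pvInner_get?, Option.or_assoc, List.find?]
    by_cases h : x ∈ cell <;> simp [h]

theorem pvFirstDict_get? (part : List (List Int)) (x : Int) :
    (pvFirstDict part).get? x = part.find? (fun c => c.contains x) := by
  unfold pvFirstDict
  rw [pvFirstDict_get?_aux]
  simp

-- A's inner loop in terms of the first cell containing b
theorem pvAInner_eq (b i : Int) (part : List (List Int)) :
    pvAInner b i part
      = match part.find? (fun c => c.contains b) with
        | some cell => !cell.contains i
        | none => false := by
  induction part with
  | nil => rfl
  | cons cell rest ih =>
    simp only [pvAInner, List.find?]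
    by_cases h : cell.contains b = true
    · simp only [h, if_pos]
      by_cases hi : cell.contains i = true <;> simp only [hi, if_pos, if_neg, Bool.not_true,
        Bool.not_false, Bool.not_eq_true]
    · simp only [h, if_neg, Bool.not_eq_true]
      rw [ih]

-- the two pair loops coincide
theorem pvLoops_eq (part : List (List Int)) (pairs : List (Int × Int)) :
    pvALoop part pairs = pvBLoop (pvFirstDict part) pairs := by
  induction pairs with
  | nil => rfl
  | cons p rest ih =>
    obtain ⟨b, i⟩ := p
    simp only [pvALoop, pvBLoop, pvAInner_eq, pvFirstDict_get?]
    cases h : List.find? (fun c => c.contains b) part with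
    | none => simpa using ih
    | some cell =>
      by_cases hi : cell.contains i = true <;> simp only [hi, Bool.not_true, Bool.not_false,
        if_pos, if_neg, Bool.false_eq_true, not_false_eq_true, ih]

-- ===== VERDICT (by name: the statement is the Claim_ definition above) =====
theorem partition_heuristic_py_spec : Claim_equal_partition_heuristic_py := by
  intro base image part _
  unfold Spec_partition_heuristic_py partition_heuristic_py partition_heuristic_py_alt
  exact pvLoops_eq part (base.zip image)
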